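-- pv_equiv track=rewrite | github.com/hongsheng-lai/kmerGLM | minimizer.py | find_syncmers
-- ===== SOURCE A (Python) =====
-- def find_syncmers(sequence, k, s, position=0):
--     """
--     Compute syncmers for a sequence.
--
--     A k-mer is a syncmer if the smallest s-mer (by lexicographical order) within it
--     appears at the specified position.
--
--     Args:
--         sequence (str): The DNA sequence.
--         k (int): Length of the k-mer.
--         s (int): Length of the substring used for syncmer condition (s < k).
--         position (int): The required position for the smallest s-mer.
--
--     Returns:
--         list: List of k-mers that satisfy the syncmer condition.
--     """
--     if s >= k:
--         raise ValueError("Parameter s must be less than k")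
--
--     syncmers = []
--     for i in range(len(sequence) - k + 1):
--         kmer = sequence[i:i+k]
--         s_mers = [kmer[j:j+s] for j in range(k - s + 1)]
--         min_s_mer = min(s_mers)
--         # Check if the s-mer at the given fixed position equals the minimum s-mer
--         if kmer[position:position+s] == min_s_mer:
--             syncmers.append(kmer)
--     return syncmers
-- ===== SOURCE B (Python) =====
-- def find_syncmers(sequence, k, s, position=0):
--     if s >= k:
--         raise ValueError("Parameter s must be less than k")
--     # normalize the required position like a Python slice start; out-of-range -> no k-mer qualifies
--     if position >= 0:
--         p = position
--         if p > k - s: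
--             return []
--     else:
--         p = position + k
--         if p < 0 or p >= k - s:
--             return []
--     n = len(sequence)
--     if n < k:                  # no k-mer fits
--         return []
--     w = k - s + 1              # number of s-mers per k-mer
--     m = n - s + 1              # number of s-mers in the sequence
--     smers = [sequence[t:t+s] for t in range(m)]
--     # block-decomposition sliding-window minimum: prefix minima resetting at
--     # multiples of w, suffix minima resetting before multiples of w
--     pre = []
--     for t in range(m):
--         v = smers[t]
--         if t % w and pre[-1] < v:
--             v = pre[-1]
--         pre.append(v)
--     suf = []
--     for t in range(m - 1, -1, -1):
--         v = smers[t]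
--         if t % w != w - 1 and suf and suf[-1] < v:
--             v = suf[-1]
--         suf.append(v)
--     suf.reverse()
--     out = []
--     for i in range(n - k + 1):
--         mn = min(suf[i], pre[i + w - 1])   # min of the window of s-mers [i, i+w-1]
--         if smers[i + p] == mn:
--             out.append(sequence[i:i+k])
--     return out
-- ===== Notes on version B (the rewrite author's own statement) =====
-- stated objective: faster
-- what changed: B precomputes all s-mers of the sequence once and computes each window's minimum s-mer by a block-decomposition sliding-window minimum (prefix/suffix block minima) instead of A's re-slicing every s-mer of every k-mer and scanning for the minimum per window; B also normalises the required position up front. Pre_ excludes s >= k (A raises ValueError) and nonpositive s when the sequence holds at least one k-mer, where A's answers are an accident of Python's empty/negative-slice clamping.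
-- outside the precondition, e.g. on find_syncmers('abcd', 2, -1, 0): A returns [], B returns ['bc', 'cd']
import Mathlib
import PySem

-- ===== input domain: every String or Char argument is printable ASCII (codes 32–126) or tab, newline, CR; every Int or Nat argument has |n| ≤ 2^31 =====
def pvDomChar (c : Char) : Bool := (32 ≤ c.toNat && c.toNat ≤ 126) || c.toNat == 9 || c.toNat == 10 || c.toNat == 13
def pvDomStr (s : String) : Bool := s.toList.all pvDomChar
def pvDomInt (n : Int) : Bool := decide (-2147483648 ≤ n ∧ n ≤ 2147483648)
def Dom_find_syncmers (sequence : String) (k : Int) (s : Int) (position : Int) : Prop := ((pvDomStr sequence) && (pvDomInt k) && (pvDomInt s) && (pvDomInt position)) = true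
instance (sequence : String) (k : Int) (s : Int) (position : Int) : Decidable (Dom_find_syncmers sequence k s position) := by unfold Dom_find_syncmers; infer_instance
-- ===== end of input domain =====

-- B replaces A's per-window substring extraction and minimum scan by one global s-mer table
-- plus a block-decomposition sliding-window minimum (prefix/suffix block minima); objective:
-- faster (fewer slicings/comparisons per window), same output on Pre_.


-- ===== PORT A =====
def find_syncmers (sequence : String) (k : Int) (s : Int) (position : Int) : List String :=
  if s ≥ k then []  -- Python: raise ValueError("Parameter s must be less than k") (excluded by Pre_)
  else
    let cs := sequence.toList
    (PySem.List.pyRange 0 ((cs.length : Int) - k + 1) 1).foldl (fun acc i =>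
      let kmer := PySem.List.slice cs (some i) (some (i + k))
      let smers := (PySem.List.pyRange 0 (k - s + 1) 1).map
        (fun j => PySem.List.slice kmer (some j) (some (j + s)))
      match PySem.List.min? smers (fun x => x) with
      | none => acc  -- Python: min([]) would raise; unreachable since s < k gives k-s+1 ≥ 2 s-mers
      | some mn =>
        if PySem.List.slice kmer (some position) (some (position + s)) = mn
        then acc ++ [String.ofList kmer] else acc) []

-- ===== PORT B =====
-- B-side helpers: xs[t] (getD default is unreachable on admitted inputs), xs[-1]
def pvAt (xs : List (List Char)) (t : Int) : List Char := (PySem.List.pyGet? xs t).getD []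
def pvLastD (xs : List (List Char)) : List Char := (PySem.List.pyGet? xs (-1)).getD []

-- the main part of B, after position normalisation (Source B lines below 'n = len(sequence)')
def pvBmain (cs : List Char) (k : Int) (s : Int) (p : Int) : List String :=
  let n : Int := cs.length
  if n < k then []  -- no k-mer fits
  else
  let w := k - s + 1
  let m := n - s + 1
  let smers := (PySem.List.pyRange 0 m 1).map (fun t => PySem.List.slice cs (some t) (some (t + s)))
  let pre := (PySem.List.pyRange 0 m 1).foldl (fun acc t =>
      let v := pvAt smers t
      let v := if PySem.Int.mod t w ≠ 0 ∧ pvLastD acc < v then pvLastD acc else v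
      acc ++ [v]) []
  let suf := ((PySem.List.pyRange (m - 1) (-1) (-1)).foldl (fun acc t =>
      let v := pvAt smers t
      let v := if PySem.Int.mod t w ≠ w - 1 ∧ acc ≠ [] ∧ pvLastD acc < v then pvLastD acc else v
      acc ++ [v]) []).reverse
  (PySem.List.pyRange 0 (n - k + 1) 1).foldl (fun out i =>
      let mn := min (pvAt suf i) (pvAt pre (i + w - 1))
      if pvAt smers (i + p) = mn
      then out ++ [String.ofList (PySem.List.slice cs (some i) (some (i + k)))] else out) []

def find_syncmers_alt (sequence : String) (k : Int) (s : Int) (position : Int) : List String :=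
  if s ≥ k then []  -- Python: raise ValueError, as in A (excluded by Pre_)
  else if 0 ≤ position then
    if position > k - s then [] else pvBmain sequence.toList k s position
  else
    if position + k < 0 ∨ position + k ≥ k - s then [] else pvBmain sequence.toList k s (position + k)

-- ===== PRECONDITION & SPEC =====
-- Pre_ excludes s ≥ k, where A raises ValueError, and nonpositive s when the sequence holds at
-- least one k-mer, a degenerate s-mer length on which A's answers are an accident of Python's
-- empty/negative-slice clamping (when k exceeds the sequence length there is no k-mer and the
-- answer is [] for every s < k, so those inputs stay admitted).
def Pre_find_syncmers (sequence : String) (k : Int) (s : Int) (position : Int) : Prop :=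
  s < k ∧ (1 ≤ s ∨ (sequence.toList.length : Int) < k)
instance (sequence : String) (k : Int) (s : Int) (position : Int) : Decidable (Pre_find_syncmers sequence k s position) := by unfold Pre_find_syncmers; infer_instance
def pvWitness_find_syncmers : String × Int × Int × Int := ("ACGTACGT", 5, 2, 0)

def Spec_find_syncmers (sequence : String) (k : Int) (s : Int) (position : Int) (out : List String) : Prop := out = find_syncmers_alt sequence k s position
instance (sequence : String) (k : Int) (s : Int) (position : Int) (out : List String) : Decidable (Spec_find_syncmers sequence k s position out) := by unfold Spec_find_syncmers; infer_instance

-- ===== CLAIM (what is proved, stated in full; the proofs are below) =====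
def Claim_equal_find_syncmers : Prop := ∀ (sequence : String) (k : Int) (s : Int) (position : Int), Dom_find_syncmers sequence k s position → Pre_find_syncmers sequence k s position → Spec_find_syncmers sequence k s position (find_syncmers sequence k s position)


-- ===== LEMMAS AND PROOFS =====

def pvV (cs : List Char) (sN : Nat) (t : Nat) : List Char := (cs.drop t).take sN
def pvIMin (cs : List Char) (sN : Nat) (a : Nat) (b : Nat) : List Char :=
  ((List.range' (a+1) (b - a)).map (pvV cs sN)).foldl min (pvV cs sN a)

lemma pyRange_zero_nonpos (b : Int) (hb : b ≤ 0) : PySem.List.pyRange 0 b 1 = [] := by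
  unfold PySem.List.pyRange
  simp only [if_neg (by norm_num : ¬ (1:Int) = 0)]
  rw [if_pos (by norm_num : (0:Int) < 1), if_neg (by omega)]
  simp

lemma pyRange_zero_int_sub (nn c : Nat) :
    PySem.List.pyRange 0 ((nn : Int) - (c : Int) + 1) 1 = List.map (fun t : Nat => (t : Int)) (List.range (nn + 1 - c)) := by
  rcases Nat.lt_or_ge (nn+1) c with h | h
  · rw [pyRange_zero_nonpos _ (by omega)]
    have : nn + 1 - c = 0 := by omega
    simp [this]
  · have : (nn : Int) - (c : Int) + 1 = ((nn + 1 - c : Nat) : Int) := by push_cast [h]; ring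
    rw [this, PySem.List.pyRange_zero_natCast]


lemma pyRange_down (m : Nat) :
    PySem.List.pyRange ((m : Int) - 1) (-1) (-1) = List.map (fun r : Nat => ((m : Int) - 1 - (r : Int))) (List.range m) := by
  unfold PySem.List.pyRange
  rw [if_neg (by norm_num), if_neg (by norm_num)]
  rcases Nat.eq_zero_or_pos m with hm | hm
  · subst hm; rw [if_neg (by norm_num)]; simp
  · rw [if_pos (by omega)]
    show List.map _ (List.range (((m:Int) - 1 - -1 + - -1 - 1) / - -1).toNat) = _
    have h2 : (((m:Int) - 1 - -1 + - -1 - 1) / - -1).toNat = m := by norm_num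
    rw [h2]
    apply List.map_congr_left
    intro r _
    ring

lemma pv_min?_bridge {α : Type} (xs : List α) (key : α → List Char) :
    PySem.List.min? xs key
    = @PySem.List.min? α (List Char) Preorder.toLT LinearOrder.toDecidableLT xs key := by
  congr 1


lemma pvIMin_mem (cs : List Char) (sN a b : Nat) (h : a ≤ b) :
    ∃ t, a ≤ t ∧ t ≤ b ∧ pvIMin cs sN a b = pvV cs sN t := by
  unfold pvIMin
  rcases PySem.List.foldl_min_mem ((List.range' (a+1) (b - a)).map (pvV cs sN)) (pvV cs sN a) with h1 | h1
  · exact ⟨a, le_refl a, h, h1⟩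
  · rcases List.mem_map.1 h1 with ⟨t, ht, hv⟩
    rcases List.mem_range'_1.1 ht with ⟨hj1, hj2⟩
    exact ⟨t, by omega, by omega, hv.symm⟩

lemma pvIMin_le (cs : List Char) (sN a b : Nat) (t : Nat) (h1 : a ≤ t) (h2 : t ≤ b) :
    pvIMin cs sN a b ≤ pvV cs sN t := by
  unfold pvIMin
  rcases Nat.eq_or_lt_of_le h1 with rfl | hlt
  · exact (PySem.List.foldl_min_le _ _).1
  · exact (PySem.List.foldl_min_le _ _).2 _ (List.mem_map.2 ⟨t, List.mem_range'_1.2 ⟨by omega, by omega⟩, rfl⟩)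

lemma pvIMin_unique (cs : List Char) (sN a b : Nat) (h : a ≤ b) (v : List Char)
    (hmem : ∃ t, a ≤ t ∧ t ≤ b ∧ v = pvV cs sN t)
    (hle : ∀ t, a ≤ t → t ≤ b → v ≤ pvV cs sN t) :
    v = pvIMin cs sN a b := by
  rcases pvIMin_mem cs sN a b h with ⟨t, ht1, ht2, ht3⟩
  rcases hmem with ⟨u, hu1, hu2, hu3⟩
  have h1 : v ≤ pvIMin cs sN a b := ht3 ▸ hle t ht1 ht2
  have h2 : pvIMin cs sN a b ≤ v := hu3 ▸ pvIMin_le cs sN a b u hu1 hu2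
  exact le_antisymm h1 h2

-- combining an overlapping/adjacent cover of [i,j]
lemma pvIMin_combine (cs : List Char) (sN i a b j : Nat)
    (hia : i ≤ a) (haj : a ≤ j) (hib : i ≤ b) (hbj : b ≤ j) (hcov : b ≤ a + 1) :
    min (pvIMin cs sN i a) (pvIMin cs sN b j) = pvIMin cs sN i j := by
  apply pvIMin_unique cs sN i j (by omega)
  · rcases min_cases (pvIMin cs sN i a) (pvIMin cs sN b j) with ⟨hm, _⟩ | ⟨hm, _⟩
    · rcases pvIMin_mem cs sN i a hia with ⟨t, h1, h2, h3⟩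
      exact ⟨t, h1, by omega, by rw [hm, h3]⟩
    · rcases pvIMin_mem cs sN b j hbj with ⟨t, h1, h2, h3⟩
      exact ⟨t, by omega, h2, by rw [hm, h3]⟩
  · intro t h1 h2
    rcases Nat.lt_or_ge a t with h | h
    · exact le_trans (min_le_right _ _) (pvIMin_le cs sN b j t (by omega) h2)
    · exact le_trans (min_le_left _ _) (pvIMin_le cs sN i a t h1 h)

lemma foldl_min_pull {α : Type} [LinearOrder α] (l : List α) (x y : α) :
    l.foldl min (min x y) = min x (l.foldl min y) := by
  induction l generalizing y with
  | nil => rfl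
  | cons z l ih =>
    simp only [List.foldl_cons]
    rw [min_assoc, ih]

lemma pvIMin_cons (cs : List Char) (sN a b : Nat) (h : a < b) :
    pvIMin cs sN a b = min (pvV cs sN a) (pvIMin cs sN (a+1) b) := by
  unfold pvIMin
  have h1 : b - a = (b - (a+1)) + 1 := by omega
  rw [h1, List.range'_succ, List.map_cons, List.foldl_cons, foldl_min_pull]

lemma pvIMin_snoc (cs : List Char) (sN a b : Nat) (h : a ≤ b) :
    pvIMin cs sN a (b+1) = min (pvIMin cs sN a b) (pvV cs sN (b+1)) := by
  unfold pvIMin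
  have h1 : b + 1 - a = (b - a) + 1 := by omega
  rw [h1, List.range'_1_concat, List.map_append]
  simp only [List.map_cons, List.map_nil, List.foldl_append, List.foldl_cons, List.foldl_nil]
  congr 2
  omega

lemma foldl_build {β : Type} (N : Nat) (body : List β → Nat → β) (g : Nat → β)
    (h : ∀ j, j < N → body ((List.range j).map g) j = g j) :
    (List.range N).foldl (fun acc t => acc ++ [body acc t]) [] = (List.range N).map g := by
  induction N with
  | zero => rfl
  | succ n ih =>
    rw [List.range_succ, List.foldl_append, List.map_append]
    rw [ih (fun j hj => h j (by omega))]
    simp [h n (by omega)]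

def pvPreF (cs : List Char) (sN wN : Nat) : Nat → List Char
  | 0 => pvV cs sN 0
  | (t+1) => if (t+1) % wN = 0 then pvV cs sN (t+1) else min (pvPreF cs sN wN t) (pvV cs sN (t+1))

def pvSufF (cs : List Char) (sN wN mN : Nat) : Nat → List Char
  | 0 => pvV cs sN (mN - 1)
  | (r+1) => if (mN - 1 - (r+1)) % wN = wN - 1 then pvV cs sN (mN - 1 - (r+1))
             else min (pvSufF cs sN wN mN r) (pvV cs sN (mN - 1 - (r+1)))

lemma pvIMin_self (cs : List Char) (sN a : Nat) : pvIMin cs sN a a = pvV cs sN a := by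
  unfold pvIMin; simp

lemma mod_pred_iff (wN t : Nat) (hw : 1 ≤ wN) : t % wN = wN - 1 ↔ wN ∣ (t + 1) := by
  constructor
  · intro h
    have h2 := Nat.div_add_mod t wN
    exact ⟨t / wN + 1, by rw [Nat.mul_succ]; omega⟩
  · rintro ⟨c, hc⟩
    have hc1 : 1 ≤ c := by
      rcases Nat.eq_zero_or_pos c with rfl | h; · omega
      · exact h
    have ht : t = (wN - 1) + wN * (c - 1) := by
      have := Nat.mul_le_mul_left wN hc1
      cases c with
      | zero => omega
      | succ c' => simp [Nat.mul_succ] at hc ⊢; omega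
    rw [ht, Nat.add_mul_mod_self_left, Nat.mod_eq_of_lt (by omega)]

lemma pvPreF_spec (cs : List Char) (sN wN : Nat) (hw : 1 ≤ wN) :
    ∀ t, pvPreF cs sN wN t = pvIMin cs sN (wN * (t / wN)) t := by
  intro t
  induction t with
  | zero => simp [pvPreF, pvIMin_self]
  | succ t ih =>
    by_cases h : (t+1) % wN = 0
    · have hdvd : wN ∣ (t+1) := Nat.dvd_iff_mod_eq_zero.2 h
      rw [pvPreF, if_pos h, Nat.mul_div_cancel' hdvd, pvIMin_self]
    · have hdvd : ¬ wN ∣ (t+1) := fun hd => h (Nat.dvd_iff_mod_eq_zero.1 hd)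
      have hdiv : (t+1) / wN = t / wN := by
        rw [Nat.succ_div, if_neg hdvd]; omega
      have hbs : wN * (t / wN) ≤ t := by
        have h3 := Nat.div_mul_le_self t wN
        have h4 : wN * (t / wN) = (t / wN) * wN := Nat.mul_comm _ _
        omega
      rw [pvPreF, if_neg h, ih, hdiv, pvIMin_snoc cs sN _ t hbs]

def pvSE (wN mN t : Nat) : Nat := min (wN * (t / wN) + (wN - 1)) (mN - 1)

lemma bs_bounds (wN t : Nat) (hw : 1 ≤ wN) : wN * (t / wN) ≤ t ∧ t < wN * (t / wN) + wN := by
  have h1 := Nat.div_add_mod t wN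
  have h2 : t % wN < wN := Nat.mod_lt _ (by omega)
  omega

lemma pvSufF_spec (cs : List Char) (sN wN mN : Nat) (hw : 1 ≤ wN) (hm : 1 ≤ mN) :
    ∀ r, r ≤ mN - 1 → pvSufF cs sN wN mN r = pvIMin cs sN (mN - 1 - r) (pvSE wN mN (mN - 1 - r)) := by
  intro r
  induction r with
  | zero =>
    intro _
    have hb := bs_bounds wN (mN - 1) hw
    have : pvSE wN mN (mN - 1) = mN - 1 := by unfold pvSE; omega
    rw [pvSufF]
    simp only [Nat.sub_zero]
    rw [this, pvIMin_self]
  | succ r ih =>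
    intro hr
    set t := mN - 1 - (r + 1) with ht
    have htr : t + 1 = mN - 1 - r := by omega
    have hb := bs_bounds wN t hw
    by_cases h : t % wN = wN - 1
    · have h1 := Nat.div_add_mod t wN
      have : pvSE wN mN t = t := by unfold pvSE; omega
      rw [pvSufF, if_pos h, this, pvIMin_self]
    · have hse : pvSE wN mN (t + 1) = pvSE wN mN t := by
        have hdvd : ¬ wN ∣ (t + 1) := fun hd => h ((mod_pred_iff wN t hw).2 hd)
        have hdiv : (t+1) / wN = t / wN := by rw [Nat.succ_div, if_neg hdvd]; omega
        unfold pvSE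
        rw [hdiv]
      have hlt : t < pvSE wN mN t := by
        have h2 : t % wN < wN - 1 := by
          have := Nat.mod_lt t (show 0 < wN by omega)
          omega
        have h1 := Nat.div_add_mod t wN
        unfold pvSE
        omega
      rw [pvSufF, if_neg h, ih (by omega), htr.symm, min_comm, ← ht, hse,
        pvIMin_cons cs sN t _ hlt]

lemma window_min (cs : List Char) (sN wN mN i : Nat) (hw : 1 ≤ wN) (hm : 1 ≤ mN)
    (hj : i + (wN - 1) ≤ mN - 1) :
    min (pvIMin cs sN i (pvSE wN mN i)) (pvIMin cs sN (wN * ((i + (wN - 1)) / wN)) (i + (wN - 1)))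
      = pvIMin cs sN i (i + (wN - 1)) := by
  set j := i + (wN - 1) with hjdef
  have hbi := bs_bounds wN i hw
  have hbj := bs_bounds wN j hw
  have hdivle : j / wN ≤ i / wN + 1 := by
    have h1 : j ≤ i + wN := by omega
    have h2 := Nat.div_le_div_right (c := wN) h1
    rwa [Nat.add_div_right _ (show 0 < wN by omega)] at h2
  have hbsle : wN * (j / wN) ≤ wN * (i / wN) + wN := by
    calc wN * (j / wN) ≤ wN * (i / wN + 1) := Nat.mul_le_mul_left _ hdivle
    _ = wN * (i / wN) + wN := by rw [Nat.mul_succ]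
  apply pvIMin_combine cs sN i (pvSE wN mN i) (wN * (j / wN)) j
  · unfold pvSE; omega
  · unfold pvSE; omega
  · omega
  · omega
  · unfold pvSE; omega

lemma pvV_take (cs : List Char) (kN sN i j : Nat) (h : j + sN ≤ kN) :
    (((cs.drop i).take kN).drop j).take sN = pvV cs sN (i + j) := by
  rw [List.drop_take, List.drop_drop, List.take_take, Nat.min_eq_left (by omega), pvV]


lemma A_nf (sequence : String) (k s position : Int) (hs : 1 ≤ s) (hk : s < k) :
    find_syncmers sequence k s position =
      ((List.range (sequence.toList.length + 1 - k.toNat)).filter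
          (fun i => decide (PySem.List.slice ((sequence.toList.drop i).take k.toNat)
              (some position) (some (position + s)) = pvIMin sequence.toList s.toNat i (i + (k.toNat - s.toNat))))).map
        (fun i => String.ofList ((sequence.toList.drop i).take k.toNat)) := by
  set cs := sequence.toList with hcs
  set kN := k.toNat with hkN
  set sN := s.toNat with hsN
  have hsk : 1 ≤ sN ∧ sN < kN := by constructor <;> omega
  have hkc : k = (kN : Int) := by omega
  have hsc : s = (sN : Int) := by omega
  rw [hkc, hsc]
  unfold find_syncmers
  rw [if_neg (by omega)]
  simp only []
  rw [pyRange_zero_int_sub cs.length kN, List.foldl_map]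
  rw [PySem.List.foldl_congr_mem _ _
      (fun acc i => if (PySem.List.slice ((cs.drop i).take kN)
              (some position) (some (position + (sN : Int))) = pvIMin cs sN i (i + (kN - sN)))
        then acc ++ [String.ofList ((cs.drop i).take kN)] else acc) []
      ?_]
  · rw [PySem.List.foldl_append_ite]
    simp
  · intro acc i hi
    simp only []
    rw [PySem.List.slice_natCast_add]
    have ew : ((kN : Int) - (sN : Int) + 1 : Int) = ((kN - sN + 1 : Nat) : Int) := by omega
    rw [ew, PySem.List.pyRange_zero_natCast, List.map_map]
    have esm : List.map ((fun j : Int => PySem.List.slice ((cs.drop i).take kN) (some j) (some (j + (sN : Int)))) ∘ (fun t : Nat => (t : Int)))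
          (List.range (kN - sN + 1))
        = List.map (fun j => pvV cs sN (i + j)) (List.range (kN - sN + 1)) := by
      apply List.map_congr_left
      intro j hj
      have hj2 : j < kN - sN + 1 := List.mem_range.1 hj
      simp only [Function.comp]
      rw [PySem.List.slice_natCast_add, pvV_take _ _ _ _ _ (by omega)]
    rw [esm, List.range_succ_eq_map, List.map_cons, pv_min?_bridge, PySem.List.min?_id_cons]
    simp only []
    have emin : List.foldl min (pvV cs sN (i + 0))
          (List.map (fun j => pvV cs sN (i + j)) (List.map Nat.succ (List.range (kN - sN))))
        = pvIMin cs sN i (i + (kN - sN)) := by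
      unfold pvIMin
      rw [Nat.add_sub_cancel_left, Nat.add_zero, List.range'_eq_map_range, List.map_map, List.map_map]
      congr 1
      apply List.map_congr_left
      intro j hj
      simp only [Function.comp]
      have : i + Nat.succ j = i + 1 + j := by omega
      rw [this]
    rw [emin]

def pvNF (cs : List Char) (kN : Nat) (sN : Nat) (pN : Nat) : List String :=
  ((List.range (cs.length + 1 - kN)).filter
      (fun i => decide (pvV cs sN (i+pN) = pvIMin cs sN i (i + (kN - sN))))).map
    (fun i => String.ofList ((cs.drop i).take kN))

lemma pvV_len (cs : List Char) (sN t : Nat) (h : t + sN ≤ cs.length) : (pvV cs sN t).length = sN := by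
  simp [pvV]
  omega


lemma pvIMin_len (cs : List Char) (sN kN i : Nat) (hsk : sN ≤ kN) (h : i + kN ≤ cs.length) :
    (pvIMin cs sN i (i + (kN - sN))).length = sN := by
  rcases pvIMin_mem cs sN i (i + (kN - sN)) (by omega) with ⟨t, h1, h2, h3⟩
  rw [h3, pvV_len cs sN t (by omega)]

lemma kmer_len (cs : List Char) (kN i : Nat) (h : i + kN ≤ cs.length) :
    ((cs.drop i).take kN).length = kN := by
  simp [List.length_take, List.length_drop]
  omega

lemma A_in (sequence : String) (k s position : Int) (hs : 1 ≤ s) (hk : s < k)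
    (h0 : 0 ≤ position) (h1 : position ≤ k - s) :
    find_syncmers sequence k s position = pvNF sequence.toList k.toNat s.toNat position.toNat := by
  rw [A_nf sequence k s position hs hk]
  unfold pvNF
  congr 1
  apply List.filter_congr
  intro i _
  congr 1
  set pN := position.toNat with hpN
  have e2 : position + s = ((pN : Nat) : Int) + ((s.toNat : Nat) : Int) := by omega
  have e1 : position = ((pN : Nat) : Int) := by omega
  rw [e2, e1, PySem.List.slice_natCast_add, pvV_take _ _ _ _ _ (by omega)]

lemma A_neg (sequence : String) (k s position : Int) (hs : 1 ≤ s) (hk : s < k)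
    (h0 : position < 0) (h1 : 0 ≤ position + k) (h2 : position + k < k - s) :
    find_syncmers sequence k s position = pvNF sequence.toList k.toNat s.toNat (position + k).toNat := by
  rw [A_nf sequence k s position hs hk]
  unfold pvNF
  congr 1
  apply List.filter_congr
  intro i hi
  have him : i < sequence.toList.length + 1 - k.toNat := List.mem_range.1 hi
  have hik : i + k.toNat ≤ sequence.toList.length := by omega
  congr 1
  have hkl := kmer_len sequence.toList k.toNat i hik
  simp only [PySem.List.slice, hkl]
  have ha : PySem.List.clampIdx k.toNat position = (position + k).toNat := by
    simp only [PySem.List.clampIdx]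
    split_ifs <;> omega
  have hb : PySem.List.clampIdx k.toNat (position + s) = (position + k).toNat + s.toNat := by
    simp only [PySem.List.clampIdx]
    split_ifs <;> omega
  rw [ha, hb, Nat.add_sub_cancel_left, pvV_take _ _ _ _ _ (by omega)]

lemma A_empty_hi (sequence : String) (k s position : Int) (hs : 1 ≤ s) (hk : s < k)
    (h0 : 0 ≤ position) (h1 : k - s < position) :
    find_syncmers sequence k s position = [] := by
  rw [A_nf sequence k s position hs hk]
  rw [List.filter_eq_nil_iff.2 ?_]
  · simp
  · intro i hi
    have him : i < sequence.toList.length + 1 - k.toNat := List.mem_range.1 hi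
    have hik : i + k.toNat ≤ sequence.toList.length := by omega
    simp only [decide_eq_true_eq]
    intro hEq
    have hl := congrArg List.length hEq
    rw [PySem.List.length_slice, kmer_len sequence.toList k.toNat i hik,
      pvIMin_len sequence.toList s.toNat k.toNat i (by omega) hik] at hl
    simp only [PySem.List.clampIdx] at hl
    split_ifs at hl <;> omega

lemma A_empty_neg (sequence : String) (k s position : Int) (hs : 1 ≤ s) (hk : s < k)
    (h0 : position < 0) (h1 : position + k < 0 ∨ k - s ≤ position + k) :
    find_syncmers sequence k s position = [] := by
  rw [A_nf sequence k s position hs hk]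
  rw [List.filter_eq_nil_iff.2 ?_]
  · simp
  · intro i hi
    have him : i < sequence.toList.length + 1 - k.toNat := List.mem_range.1 hi
    have hik : i + k.toNat ≤ sequence.toList.length := by omega
    simp only [decide_eq_true_eq]
    intro hEq
    have hl := congrArg List.length hEq
    rw [PySem.List.length_slice, kmer_len sequence.toList k.toNat i hik,
      pvIMin_len sequence.toList s.toNat k.toNat i (by omega) hik] at hl
    simp only [PySem.List.clampIdx] at hl
    split_ifs at hl <;> omega

lemma pvAt_map_range (f : Nat → List Char) (mN t : Nat) (ht : t < mN) :
    pvAt (List.map f (List.range mN)) (t : Int) = f t := by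
  unfold pvAt
  rw [PySem.List.pyGet?_natCast, List.getElem?_map, List.getElem?_range ht]
  rfl

lemma pvLastD_map_range (g : Nat → List Char) (j : Nat) (hj : 1 ≤ j) :
    pvLastD (List.map g (List.range j)) = g (j - 1) := by
  unfold pvLastD
  rw [PySem.List.pyGet?_neg_one]
  have : j = (j - 1) + 1 := by omega
  rw [this, List.range_succ, List.map_append]
  simp

lemma pvAt_reverse_map_range (g : Nat → List Char) (mN t : Nat) (ht : t < mN) :
    pvAt ((List.map g (List.range mN)).reverse) (t : Int) = g (mN - 1 - t) := by
  unfold pvAt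
  rw [PySem.List.pyGet?_natCast, List.getElem?_reverse (by simp; omega)]
  simp only [List.length_map, List.length_range]
  rw [List.getElem?_map, List.getElem?_range (by omega)]
  rfl


lemma pre_step (cs : List Char) (sN wN mN : Nat) (j : Nat) (hj : j < mN) :
    (if PySem.Int.mod (j : Int) ((wN : Nat) : Int) ≠ 0 ∧
          pvLastD ((List.range j).map (pvPreF cs sN wN)) < pvAt (List.map (pvV cs sN) (List.range mN)) (j : Int)
      then pvLastD ((List.range j).map (pvPreF cs sN wN))
      else pvAt (List.map (pvV cs sN) (List.range mN)) (j : Int)) = pvPreF cs sN wN j := by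
  rw [pvAt_map_range _ _ _ hj, PySem.Int.mod_natCast]
  cases j with
  | zero =>
    rw [if_neg (by simp [Nat.zero_mod])]
    rfl
  | succ t =>
    have hlast : pvLastD ((List.range (t+1)).map (pvPreF cs sN wN)) = pvPreF cs sN wN t := by
      rw [pvLastD_map_range _ _ (by omega)]
      congr 1
    by_cases hmod : (t+1) % wN = 0
    · rw [if_neg (by simp [hmod]), pvPreF, if_pos hmod]
    · rw [hlast]
      by_cases hlt : pvPreF cs sN wN t < pvV cs sN (t+1)
      · rw [if_pos ⟨by exact_mod_cast hmod, hlt⟩, pvPreF, if_neg hmod, min_eq_left hlt.le]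
      · rw [if_neg (by intro h; exact hlt h.2), pvPreF, if_neg hmod, min_eq_right (not_lt.1 hlt)]

lemma suf_step (cs : List Char) (sN wN mN : Nat) (hw : 1 ≤ wN) (j : Nat) (hj : j < mN) :
    (if PySem.Int.mod ((mN : Int) - 1 - (j : Int)) ((wN : Nat) : Int) ≠ ((wN : Nat) : Int) - 1 ∧
          ((List.range j).map (pvSufF cs sN wN mN)) ≠ [] ∧
          pvLastD ((List.range j).map (pvSufF cs sN wN mN)) < pvAt (List.map (pvV cs sN) (List.range mN)) ((mN : Int) - 1 - (j : Int))
      then pvLastD ((List.range j).map (pvSufF cs sN wN mN))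
      else pvAt (List.map (pvV cs sN) (List.range mN)) ((mN : Int) - 1 - (j : Int))) = pvSufF cs sN wN mN j := by
  have hidx : (mN : Int) - 1 - (j : Int) = ((mN - 1 - j : Nat) : Int) := by omega
  rw [hidx, pvAt_map_range _ _ _ (by omega), PySem.Int.mod_natCast]
  have hw1 : ((wN : Nat) : Int) - 1 = ((wN - 1 : Nat) : Int) := by omega
  rw [hw1]
  cases j with
  | zero =>
    rw [if_neg (by simp)]
    rfl
  | succ r =>
    have hlast : pvLastD ((List.range (r+1)).map (pvSufF cs sN wN mN)) = pvSufF cs sN wN mN r := by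
      rw [pvLastD_map_range _ _ (by omega)]
      congr 1
    have hne : ((List.range (r+1)).map (pvSufF cs sN wN mN)) ≠ [] := by simp
    by_cases hmod : (mN - 1 - (r+1)) % wN = wN - 1
    · rw [if_neg (by simp [hmod]), pvSufF, if_pos hmod]
    · rw [hlast]
      by_cases hlt : pvSufF cs sN wN mN r < pvV cs sN (mN - 1 - (r+1))
      · rw [if_pos ⟨by exact_mod_cast hmod, hne, hlt⟩, pvSufF, if_neg hmod, min_eq_left hlt.le]
      · rw [if_neg (by intro h; exact hlt h.2.2), pvSufF, if_neg hmod, min_eq_right (not_lt.1 hlt)]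


lemma A_trivial (sequence : String) (k s position : Int) (hn : (sequence.toList.length : Int) < k) :
    find_syncmers sequence k s position = [] := by
  unfold find_syncmers
  by_cases hge : s ≥ k
  · rw [if_pos hge]
  · rw [if_neg hge]
    simp only []
    rw [pyRange_zero_nonpos ((sequence.toList.length : Int) - k + 1) (by omega)]
    rfl

lemma B_trivial (sequence : String) (k s position : Int) (hk : ¬ s ≥ k)
    (hn : (sequence.toList.length : Int) < k) :
    find_syncmers_alt sequence k s position = [] := by
  have hmain : pvBmain sequence.toList k s position = [] ∧
      pvBmain sequence.toList k s (position + k) = [] := by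
    constructor <;>
      · unfold pvBmain
        simp only []
        rw [if_pos (by omega : (sequence.toList.length : Int) < k)]
  unfold find_syncmers_alt
  rw [if_neg hk]
  by_cases hp : 0 ≤ position
  · rw [if_pos hp]
    split_ifs with h
    · rfl
    · exact hmain.1
  · rw [if_neg hp]
    split_ifs with h
    · rfl
    · exact hmain.2

lemma B_nf (sequence : String) (k s p : Int)
    (hs : 1 ≤ s) (hk : s < k) (h0 : 0 ≤ p) (h1 : p ≤ k - s) :
    pvBmain sequence.toList k s p = pvNF sequence.toList k.toNat s.toNat p.toNat := by
  set cs := sequence.toList with hcs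
  set kN := k.toNat with hkN
  set sN := s.toNat with hsN
  set pN := p.toNat with hpN
  have hkc : k = (kN : Int) := by omega
  have hsc : s = (sN : Int) := by omega
  have hpc : p = (pN : Int) := by omega
  have hsk1 : 1 ≤ sN := by omega
  have hsk2 : sN < kN := by omega
  have hp2 : pN ≤ kN - sN := by omega
  unfold pvBmain
  simp only []
  by_cases hnk : (cs.length : Int) < k
  · rw [if_pos hnk]
    unfold pvNF
    rw [show cs.length + 1 - kN = 0 from by omega]
    simp
  rw [if_neg hnk]
  rw [hkc, hsc, hpc]
  by_cases hbig : cs.length + 1 < sN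
  · rw [pyRange_zero_nonpos ((cs.length : Int) - (kN:Int) + 1) (by omega)]
    unfold pvNF
    rw [show cs.length + 1 - kN = 0 from by omega]
    simp
  · set wN := kN - sN + 1 with hwN
    set mN := cs.length + 1 - sN with hmN
    have hwcast : ((kN:Int)) - (sN:Int) + 1 = ((wN : Nat) : Int) := by omega
    have hmcast : ((cs.length:Int)) - (sN:Int) + 1 = ((mN : Nat) : Int) := by omega
    rw [hwcast, hmcast]
    rw [PySem.List.pyRange_zero_natCast mN, pyRange_zero_int_sub cs.length kN, pyRange_down mN]
    simp only [List.foldl_map]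
    have hsmers : List.map (fun t : Int => PySem.List.slice cs (some t) (some (t + (sN:Int)))) (List.map (fun k : Nat => (k:Int)) (List.range mN)) = List.map (pvV cs sN) (List.range mN) := by
      rw [List.map_map]
      apply List.map_congr_left
      intro t _
      simp only [Function.comp]
      rw [PySem.List.slice_natCast_add]
      rfl
    rw [hsmers]
    have hpre := foldl_build mN (fun acc (y : Nat) =>
        if PySem.Int.mod (y:Int) ((wN : Nat):Int) ≠ 0 ∧ pvLastD acc < pvAt (List.map (pvV cs sN) (List.range mN)) (y:Int)
        then pvLastD acc else pvAt (List.map (pvV cs sN) (List.range mN)) (y:Int))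
      (pvPreF cs sN wN) (fun j hj => pre_step cs sN wN mN j hj)
    rw [hpre]
    have hsuf := foldl_build mN (fun acc (y : Nat) =>
        if PySem.Int.mod ((mN:Int) - 1 - (y:Int)) ((wN : Nat):Int) ≠ ((wN : Nat):Int) - 1 ∧ acc ≠ [] ∧ pvLastD acc < pvAt (List.map (pvV cs sN) (List.range mN)) ((mN:Int) - 1 - (y:Int))
        then pvLastD acc else pvAt (List.map (pvV cs sN) (List.range mN)) ((mN:Int) - 1 - (y:Int)))
      (pvSufF cs sN wN mN) (fun j hj => suf_step cs sN wN mN (by omega) j hj)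
    rw [hsuf]
    rw [PySem.List.foldl_congr_mem _ _
        (fun out i => if (pvV cs sN (i + pN) = pvIMin cs sN i (i + (kN - sN)))
          then out ++ [String.ofList ((cs.drop i).take kN)] else out) [] ?_]
    · rw [PySem.List.foldl_append_ite]
      unfold pvNF
      simp
    · intro out i hi
      simp only []
      have him : i < cs.length + 1 - kN := List.mem_range.1 hi
      have hik : i + kN ≤ cs.length := by omega
      have hiw : i + (wN - 1) < mN := by omega
      have e1 : (i:Int) + (pN:Int) = ((i + pN : Nat) : Int) := by omega
      have e2 : (i:Int) + ((wN:Nat):Int) - 1 = ((i + (wN - 1) : Nat) : Int) := by omega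
      have e3 : (i:Int) + ((kN:Nat):Int) = ((i + kN : Nat):Int) := by omega
      rw [e1, e2, e3, pvAt_map_range (pvV cs sN) mN (i + pN) (by omega),
        pvAt_reverse_map_range (pvSufF cs sN wN mN) mN i (by omega),
        pvAt_map_range (pvPreF cs sN wN) mN (i + (wN - 1)) hiw]
      have e4 : ((i + kN : Nat):Int) = (i:Int) + ((kN:Nat):Int) := by omega
      rw [e4, PySem.List.slice_natCast_add]
      rw [pvSufF_spec cs sN wN mN (by omega) (by omega) (mN - 1 - i) (by omega)]
      rw [show mN - 1 - (mN - 1 - i) = i from by omega]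
      rw [pvPreF_spec cs sN wN (by omega) (i + (wN - 1))]
      rw [window_min cs sN wN mN i (by omega) (by omega) (by omega)]
      rw [show i + (wN - 1) = i + (kN - sN) from by omega]

-- ===== VERDICT (by name: the statement is the Claim_ definition above) =====
theorem find_syncmers_spec : Claim_equal_find_syncmers := by
  intro sequence k s position _hdom hpre
  obtain ⟨hk, hrest⟩ := hpre
  unfold Spec_find_syncmers
  rcases hrest with hs | hn
  · unfold find_syncmers_alt
    rw [if_neg (by omega)]
    by_cases hp : 0 ≤ position
    · rw [if_pos hp]
      by_cases hhi : position > k - s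
      · rw [if_pos hhi, A_empty_hi sequence k s position hs hk hp hhi]
      · rw [if_neg hhi, A_in sequence k s position hs hk hp (by omega),
          B_nf sequence k s position hs hk hp (by omega)]
    · rw [if_neg hp]
      by_cases hbad : position + k < 0 ∨ position + k ≥ k - s
      · rw [if_pos hbad, A_empty_neg sequence k s position hs hk (by omega) (by omega)]
      · push Not at hbad
        rw [if_neg (by omega), A_neg sequence k s position hs hk (by omega) (by omega) (by omega),
          B_nf sequence k s (position + k) hs hk (by omega) (by omega)]
  · rw [A_trivial sequence k s position hn, B_trivial sequence k s position (by omega) hn]
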